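-- pv_equiv track=rewrite | github.com/calvinp0/HAb_DB | api/routers/utils.py | elem_counts_from_smiles
-- ===== SOURCE A (Python) =====
-- from collections import Counter
-- from typing import Dict, Iterable
--
-- def elem_counts_from_smiles(smiles: str) -> Dict[str, int]:
--     if not smiles:
--         return {}
--     out: Counter[str] = Counter()
--     i = 0
--     s = smiles
--     while i < len(s):
--         ch = s[i]
--         # bracketed atoms like [Fe], [NH4+]
--         if ch == "[":
--             j = s.find("]", i + 1)
--             if j == -1:
--                 break
--             token = s[i + 1 : j]
--             # first capital letter + optional lowercase
--             el = ""
--             for k, c in enumerate(token):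
--                 if c.isalpha():
--                     el += c
--                     # grab next lowercase if present
--                     if k + 1 < len(token) and token[k + 1].islower():
--                         el += token[k + 1]
--                     break
--             if el:
--                 out[el.capitalize()] += 1
--             i = j + 1
--             continue
--         # bare elements: B, Br, C, Cl, N, O, P, S, F, I, Si, ...
--         if ch.isalpha():
--             el = ch
--             if i + 1 < len(s) and s[i + 1].islower():
--                 el += s[i + 1]
--                 i += 1
--             out[el.capitalize()] += 1
--         i += 1
--     # remove hydrogens for “heavy atom” purposes if you want
--     return dict(out)
-- ===== SOURCE B (Python) =====
-- from collections import Counter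
--
--
-- def _first_elem(token):
--     # first letter in the bracket body, plus an immediately following lowercase letter
--     i = 0
--     while i < len(token) and not token[i].isalpha():
--         i += 1
--     t = token[i:]
--     if not t:
--         return ""
--     return t[:2] if len(t) > 1 and t[1].islower() else t[:1]
--
--
-- def _bare(chunk, toks):
--     # chunk contains no brackets: collect bare element tokens
--     i = 0
--     n = len(chunk)
--     while i < n:
--         if chunk[i].isalpha():
--             m = 2 if i + 1 < n and chunk[i + 1].islower() else 1
--             toks.append(chunk[i:i + m].capitalize())
--             i += m
--         else:
--             i += 1
--
--
-- def elem_counts_from_smiles(smiles: str) -> dict: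
--     # cut the string at each ']'; in every piece, everything before the first '['
--     # is bare atoms and the remainder is one bracket body closed by that ']'
--     parts = smiles.split("]")
--     toks = []
--     for p in parts[:-1]:
--         head, sep, body = p.partition("[")
--         _bare(head, toks)
--         if sep:
--             el = _first_elem(body)
--             if el:
--                 toks.append(el.capitalize())
--     # after the last ']' a '[' is unmatched and ends the scan
--     _bare(parts[-1].partition("[")[0], toks)
--     return dict(Counter(toks))
-- ===== Notes on version B (the rewrite author's own statement) =====
-- stated objective: alternative
-- what changed: B replaces A's single index-scanning while-loop with inline Counter increments by a decomposition that splits the string at each closing bracket, partitions every piece at its first opening bracket into a bracket-free chunk (scanned for bare atoms) and one bracket body, collects all element tokens into a list and counts them once with Counter(tokens) at the end.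
import Mathlib
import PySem

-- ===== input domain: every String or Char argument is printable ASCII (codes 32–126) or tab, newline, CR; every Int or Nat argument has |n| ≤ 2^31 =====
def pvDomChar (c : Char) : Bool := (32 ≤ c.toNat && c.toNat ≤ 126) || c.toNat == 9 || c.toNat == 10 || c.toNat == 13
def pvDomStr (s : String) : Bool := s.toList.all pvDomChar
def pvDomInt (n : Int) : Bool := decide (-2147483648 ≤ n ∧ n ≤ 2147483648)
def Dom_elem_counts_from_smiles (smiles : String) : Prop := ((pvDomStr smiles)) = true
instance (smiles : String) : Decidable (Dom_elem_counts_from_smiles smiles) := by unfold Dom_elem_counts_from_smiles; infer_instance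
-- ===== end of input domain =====

-- B re-implements the scan as closing-bracket segment splitting with per-segment partitioning
-- (tokenize then Counter) instead of A's single index loop with inline counting; objective:
-- alternative (same asymptotic cost).

-- char predicates / capitalize, shared by both ports; exact on the printable-ASCII domain
def pyIsAlpha (c : Char) : Bool := ('A' ≤ c && c ≤ 'Z') || ('a' ≤ c && c ≤ 'z')
def pyIsLower (c : Char) : Bool := ('a' ≤ c && c ≤ 'z')
def pyCap : List Char → String
  | [] => ""
  | c :: rest => String.mk (c.toUpper :: rest.map Char.toLower)

-- ===== PORT A =====
-- s.find("]", i+1) together with the two slices s[i+1:j], s[j+1:]: split at the first ']'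
def aSplitClose : List Char → Option (List Char × List Char)
  | [] => none
  | c :: rest =>
    if c = ']' then some ([], rest)
    else
      match aSplitClose rest with
      | none => none
      | some (t, a) => some (c :: t, a)

-- the inner 'for k, c in enumerate(token)' loop building el and breaking at the first letter
def aElem : List Char → List Char
  | [] => []
  | c :: rest =>
    if pyIsAlpha c then
      match rest with
      | c2 :: _ => if pyIsLower c2 then [c, c2] else [c]
      | [] => [c]
    else aElem rest

-- out[el] += 1 on a Counter
def aStep (out : PySem.Dict String Int) (el : String) : PySem.Dict String Int := out.modify el 0 (· + 1)

theorem aSplitClose_lt : ∀ (cs t a : List Char), aSplitClose cs = some (t, a) → a.length < cs.length := by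
  intro cs
  induction cs with
  | nil => intro t a h; simp [aSplitClose] at h
  | cons c rest ih =>
    intro t a h
    by_cases hc : c = ']'
    · simp [aSplitClose, hc] at h
      obtain ⟨h1, h2⟩ := h
      subst h2
      simp
    · cases hsc : aSplitClose rest with
      | none => simp [aSplitClose, hc, hsc] at h
      | some p =>
        obtain ⟨t', a'⟩ := p
        simp [aSplitClose, hc, hsc] at h
        obtain ⟨h1, h2⟩ := h
        subst h2
        exact Nat.lt_succ_of_lt (ih t' a' hsc)

-- the main 'while i < len(s)' loop of A, consuming the remaining suffix
def aLoop : List Char → PySem.Dict String Int → PySem.Dict String Int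
  | [], out => out
  | ch :: rest, out =>
    if ch = '[' then
      match hsc : aSplitClose rest with
      | none => out
      | some (tok, after) =>
        match aElem tok with
        | [] => aLoop after out
        | el => aLoop after (aStep out (pyCap el))
    else if pyIsAlpha ch then
      match rest with
      | c2 :: rest2 =>
        if pyIsLower c2 then aLoop rest2 (aStep out (pyCap [ch, c2]))
        else aLoop (c2 :: rest2) (aStep out (pyCap [ch]))
      | [] => aLoop [] (aStep out (pyCap [ch]))
    else aLoop rest out
termination_by cs _ => cs.length
decreasing_by
  all_goals first
    | exact Nat.lt_succ_of_lt (aSplitClose_lt _ _ _ hsc)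
    | (simp; omega)
    | simp

def elem_counts_from_smiles (smiles : String) : List (String × Int) :=
  if smiles = "" then []
  else (aLoop smiles.toList PySem.Dict.empty).items

-- ===== PORT B =====
-- _first_elem: skip non-letters, then take the letter plus an optional following lowercase
def bFirstElem (token : List Char) : List Char :=
  match token.dropWhile (fun c => !pyIsAlpha c) with
  | [] => []
  | c :: rest =>
    match rest with
    | c2 :: _ => if pyIsLower c2 then [c, c2] else [c]
    | [] => [c]

-- _bare: collect bare element tokens from a bracket-free chunk
def bBare : List Char → List String
  | [] => []
  | c :: rest =>
    if pyIsAlpha c then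
      match rest with
      | c2 :: rest2 =>
        if pyIsLower c2 then pyCap [c, c2] :: bBare rest2
        else pyCap [c] :: bBare (c2 :: rest2)
      | [] => [pyCap [c]]
    else bBare rest

-- p.partition("[")  (hand-ported step for step: PySem has no partition primitive; exact)
def bPartL : List Char → List Char × List Char × List Char
  | [] => ([], [], [])
  | c :: rest =>
    if c = '[' then ([], ['['], rest)
    else
      let p := bPartL rest
      (c :: p.1, p.2.1, p.2.2)

-- the body of B's 'for p in parts[:-1]' loop, as the tokens it appends
def bPieceToks (p : List Char) : List String :=
  let q := bPartL p
  bBare q.1 ++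
    (if q.2.1 ≠ [] then
      (match bFirstElem q.2.2 with
       | [] => []
       | el => [pyCap el])
     else [])

def elem_counts_from_smiles_alt (smiles : String) : List (String × Int) :=
  -- smiles.split("]")  (split? with the non-empty literal separator "]" is 'some (splitOn …)')
  let parts := PySem.Chars.splitOn smiles.toList [']']
  let toks := parts.dropLast.foldl (fun toks p => toks ++ bPieceToks p) []
  -- parts[-1]: split always yields at least one part
  let toks := toks ++ bBare (bPartL (parts.getLastD [])).1
  (PySem.Dict.counter toks).items

-- ===== PRECONDITION & SPEC =====
def Spec_elem_counts_from_smiles (smiles : String) (out : List (String × Int)) : Prop := out = elem_counts_from_smiles_alt smiles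
instance (smiles : String) (out : List (String × Int)) : Decidable (Spec_elem_counts_from_smiles smiles out) := by unfold Spec_elem_counts_from_smiles; infer_instance

-- ===== CLAIM (what is proved, stated in full; the proofs are below) =====
def Claim_equal_elem_counts_from_smiles : Prop := ∀ (smiles : String), Dom_elem_counts_from_smiles smiles → Spec_elem_counts_from_smiles smiles (elem_counts_from_smiles smiles)

-- ===== LEMMAS AND PROOFS =====

-- the list of segments A's ']'-splitting induces (proof-side mirror of splitOn … [']'])
def spl (cs : List Char) : List (List Char) :=
  match hsc : aSplitClose cs with
  | none => [cs]
  | some (t, r) => t :: spl r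
termination_by cs.length
decreasing_by exact aSplitClose_lt _ _ _ hsc

def mapHead (f : List Char → List Char) : List (List Char) → List (List Char)
  | [] => []
  | x :: xs => f x :: xs

theorem aSplitClose_none_iff (cs : List Char) : aSplitClose cs = none ↔ ']' ∉ cs := by
  induction cs with
  | nil => simp [aSplitClose]
  | cons c rest ih =>
    by_cases hc : c = ']'
    · simp [aSplitClose, hc]
    · cases hsc : aSplitClose rest with
      | none => simp [aSplitClose, hc, hsc, Ne.symm hc, ← ih, hsc]
      | some p => simp [aSplitClose, hc, hsc, Ne.symm hc, ← ih, hsc]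

theorem aSplitClose_eq (cs : List Char) : ∀ (t r : List Char), aSplitClose cs = some (t, r) →
    cs = t ++ ']' :: r ∧ ']' ∉ t := by
  induction cs with
  | nil => intro t r h; simp [aSplitClose] at h
  | cons c rest ih =>
    intro t r h
    by_cases hc : c = ']'
    · simp [aSplitClose, hc] at h
      obtain ⟨h1, h2⟩ := h
      subst h1; subst h2
      simp [hc]
    · cases hsc : aSplitClose rest with
      | none => simp [aSplitClose, hc, hsc] at h
      | some p =>
        obtain ⟨t', r'⟩ := p
        simp [aSplitClose, hc, hsc] at h
        obtain ⟨h1, h2⟩ := h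
        subst h1; subst h2
        obtain ⟨ht, hmem⟩ := ih t' r' hsc
        constructor
        · simp [ht]
        · simp [hmem]
          exact fun h => hc h.symm

theorem aSplitClose_append (t : List Char) (r : List Char) (h : ']' ∉ t) :
    aSplitClose (t ++ ']' :: r) = some (t, r) := by
  induction t with
  | nil => simp [aSplitClose]
  | cons c t' ih =>
    simp at h
    have hc : ¬ c = ']' := fun hh => h.1 hh.symm
    simp [aSplitClose, hc, ih h.2]

theorem spl_eq_none (cs : List Char) (h : aSplitClose cs = none) : spl cs = [cs] := by
  rw [spl]
  split
  · rfl
  · next t r heq => simp [h] at heq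

theorem spl_eq_some (cs t r : List Char) (h : aSplitClose cs = some (t, r)) :
    spl cs = t :: spl r := by
  rw [spl]
  split
  · next heq => simp [h] at heq
  · next t1 r1 heq =>
    rw [h] at heq
    injection heq with heq
    injection heq with h1 h2
    subst h1; subst h2
    rfl

theorem spl_nil : spl [] = [[]] := by
  exact spl_eq_none [] rfl

theorem spl_close (r : List Char) : spl (']' :: r) = [] :: spl r := by
  exact spl_eq_some _ _ _ (by simp [aSplitClose])

theorem spl_cons_ne (c : Char) (r : List Char) (h : c ≠ ']') :
    spl (c :: r) = mapHead (c :: ·) (spl r) := by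
  cases hsc : aSplitClose r with
  | none =>
    rw [spl_eq_none _ hsc, spl_eq_none _ (by simp [aSplitClose, h, hsc])]
    rfl
  | some p =>
    obtain ⟨t, a⟩ := p
    rw [spl_eq_some _ _ _ hsc, spl_eq_some (c :: r) (c :: t) a (by simp [aSplitClose, h, hsc])]
    rfl

theorem spl_ne_nil (cs : List Char) : spl cs ≠ [] := by
  cases hsc : aSplitClose cs with
  | none => rw [spl_eq_none _ hsc]; simp
  | some p => obtain ⟨t, a⟩ := p; rw [spl_eq_some _ _ _ hsc]; simp

theorem splitOn_go_spec : ∀ (fuel : Nat) (l cur : List Char) (acc : List (List Char)),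
    l.length < fuel →
    PySem.Chars.splitOn.go [']'] fuel l cur acc = acc.reverse ++ mapHead (cur.reverse ++ ·) (spl l) := by
  intro fuel
  induction fuel with
  | zero => intro l cur acc h; omega
  | succ fuel ih =>
    intro l cur acc h
    cases l with
    | nil =>
      rw [PySem.Chars.splitOn.go, spl_nil]
      · simp [mapHead]
      · omega
    | cons c rest =>
      by_cases hc : c = ']'
      · subst hc
        rw [PySem.Chars.splitOn.go]
        have hpre : [']'].isPrefixOf (']' :: rest) = true := by simp [List.isPrefixOf]
        rw [if_pos hpre]
        simp only [List.length_singleton, List.drop_succ_cons, List.drop_zero]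
        rw [ih rest [] _ (by simp at h ⊢; omega), spl_close]
        cases hspl : spl rest with
        | nil => exact absurd hspl (spl_ne_nil rest)
        | cons X Xs => simp [mapHead]
      · rw [PySem.Chars.splitOn.go]
        have hpre : [']'].isPrefixOf (c :: rest) = false := by
          simp [List.isPrefixOf]
          exact fun hh => hc hh.symm
        rw [if_neg (by simp [hpre])]
        rw [ih rest (c :: cur) acc (by simp at h ⊢; omega), spl_cons_ne c rest hc]
        cases hspl : spl rest with
        | nil => exact absurd hspl (spl_ne_nil rest)
        | cons X Xs => simp [mapHead]

theorem splitOn_eq_spl (cs : List Char) : PySem.Chars.splitOn cs [']'] = spl cs := by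
  rw [PySem.Chars.splitOn, splitOn_go_spec (cs.length + 1) cs [] [] (by omega)]
  cases hspl : spl cs with
  | nil => exact absurd hspl (spl_ne_nil cs)
  | cons X Xs => simp [mapHead]

theorem aLoop_nil (d : PySem.Dict String Int) : aLoop [] d = d := by
  rw [aLoop]

theorem aLoop_bracket_none (rest : List Char) (d : PySem.Dict String Int)
    (h : aSplitClose rest = none) : aLoop ('[' :: rest) d = d := by
  rw [aLoop.eq_def]
  split
  · first | rfl | simp_all
  · rename_i ch' rest' heq
    injection heq with h1 h2
    subst h1; subst h2
    rw [if_pos rfl]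
    split
    · rfl
    · rename_i t1 a1 heq2; simp [h] at heq2

theorem aLoop_bracket_some (rest tok after : List Char) (d : PySem.Dict String Int)
    (h : aSplitClose rest = some (tok, after)) :
    aLoop ('[' :: rest) d =
      (match aElem tok with
       | [] => aLoop after d
       | el => aLoop after (aStep d (pyCap el))) := by
  rw [aLoop.eq_def]
  split
  · first | rfl | simp_all
  · rename_i ch' rest' heq
    injection heq with h1 h2
    subst h1; subst h2
    rw [if_pos rfl]
    split
    · rename_i heq2; simp [h] at heq2
    · rename_i t1 a1 heq2
      rw [h] at heq2
      injection heq2 with heq2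
      injection heq2 with h1 h2
      subst h1; subst h2
      rfl

theorem aLoop_lower (ch c2 : Char) (rest2 : List Char) (d : PySem.Dict String Int)
    (hbr : ch ≠ '[') (ha : pyIsAlpha ch = true) (hl : pyIsLower c2 = true) :
    aLoop (ch :: c2 :: rest2) d = aLoop rest2 (aStep d (pyCap [ch, c2])) := by
  rw [aLoop]
  simp [hbr, ha, hl]

theorem aLoop_alpha_single (ch c2 : Char) (rest2 : List Char) (d : PySem.Dict String Int)
    (hbr : ch ≠ '[') (ha : pyIsAlpha ch = true) (hl : ¬ pyIsLower c2 = true) :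
    aLoop (ch :: c2 :: rest2) d = aLoop (c2 :: rest2) (aStep d (pyCap [ch])) := by
  rw [aLoop]
  simp [hbr, ha, hl]

theorem aLoop_alpha_last (ch : Char) (d : PySem.Dict String Int)
    (hbr : ch ≠ '[') (ha : pyIsAlpha ch = true) :
    aLoop [ch] d = aStep d (pyCap [ch]) := by
  rw [aLoop.eq_def]
  simp [hbr, ha]
  rw [aLoop.eq_def]

theorem aLoop_skip (ch : Char) (rest : List Char) (d : PySem.Dict String Int)
    (hbr : ch ≠ '[') (ha : ¬ pyIsAlpha ch = true) :
    aLoop (ch :: rest) d = aLoop rest d := by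
  rw [aLoop.eq_def]
  split
  · first | rfl | simp_all
  · rename_i ch' rest' heq
    injection heq with h1 h2
    subst h1; subst h2
    simp [hbr, ha]

theorem bPartL_cons (c : Char) (rest : List Char) (h : c ≠ '[') :
    bPartL (c :: rest) = (c :: (bPartL rest).1, (bPartL rest).2.1, (bPartL rest).2.2) := by
  simp [bPartL, h]

theorem elem_eq (tok : List Char) : aElem tok = bFirstElem tok := by
  induction tok with
  | nil => rfl
  | cons c rest ih =>
    by_cases hc : pyIsAlpha c
    · simp [aElem, bFirstElem, List.dropWhile, hc]
    · simp [aElem, bFirstElem, List.dropWhile, hc] at ih ⊢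
      exact ih

theorem bBare_cons_not_alpha (c : Char) (X : List Char) (ha : ¬ pyIsAlpha c = true) :
    bBare (c :: X) = bBare X := by
  cases X <;> simp [bBare, ha]

theorem pyIsLower_ne (c : Char) (h : pyIsLower c = true) : c ≠ '[' ∧ c ≠ ']' := by
  constructor <;> rintro rfl <;> exact absurd h (by decide)

-- A's loop on a ']'-free suffix counts exactly the bare tokens before the first '['
theorem aLoop_no_close : ∀ (n : Nat) (cs : List Char), cs.length ≤ n → ']' ∉ cs →
    ∀ (d : PySem.Dict String Int), aLoop cs d = List.foldl aStep d (bBare (bPartL cs).1) := by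
  intro n
  induction n with
  | zero =>
    intro cs h _ d
    cases cs with
    | nil => simp [aLoop_nil, bPartL, bBare]
    | cons c rest => simp at h
  | succ n ih =>
    intro cs hlen hm d
    cases cs with
    | nil => simp [aLoop_nil, bPartL, bBare]
    | cons c rest =>
      simp only [List.mem_cons, not_or] at hm
      obtain ⟨hm1, hm2⟩ := hm
      by_cases hbr : c = '['
      · subst hbr
        rw [aLoop_bracket_none _ _ ((aSplitClose_none_iff rest).mpr hm2)]
        simp [bPartL, bBare]
      · by_cases ha : pyIsAlpha c
        · cases rest with
          | nil =>
            rw [aLoop_alpha_last c d hbr ha]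
            simp [bPartL, hbr, bBare, ha]
          | cons c2 rest2 =>
            simp only [List.mem_cons, not_or] at hm2
            obtain ⟨hm21, hm22⟩ := hm2
            by_cases hl : pyIsLower c2
            · have h2ne : c2 ≠ '[' := (pyIsLower_ne c2 hl).1
              rw [aLoop_lower c c2 rest2 d hbr ha hl,
                  ih rest2 (by simp at hlen ⊢; omega) hm22,
                  bPartL_cons c _ hbr, bPartL_cons c2 _ h2ne]
              simp [bBare, ha, hl]
            · rw [aLoop_alpha_single c c2 rest2 d hbr ha hl,
                  ih (c2 :: rest2) (by simp at hlen ⊢; omega)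
                    (by simp [List.mem_cons, not_or]; exact ⟨hm21, hm22⟩),
                  bPartL_cons c _ hbr]
              by_cases h2b : c2 = '['
              · subst h2b
                simp [bPartL, bBare, ha]
              · rw [bPartL_cons c2 _ h2b]
                simp [bBare, ha, hl]
        · rw [aLoop_skip c rest d hbr ha,
              ih rest (by simp at hlen ⊢; omega) hm2,
              bPartL_cons c _ hbr, bBare_cons_not_alpha c _ ha]

-- A's loop through one segment and its closing ']' counts exactly bPieceToks of the segment
theorem aLoop_segment : ∀ (n : Nat) (tok : List Char), tok.length ≤ n → ']' ∉ tok →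
    ∀ (r : List Char) (d : PySem.Dict String Int),
    aLoop (tok ++ ']' :: r) d = aLoop r (List.foldl aStep d (bPieceToks tok)) := by
  intro n
  induction n with
  | zero =>
    intro tok h _ r d
    cases tok with
    | nil =>
      simp only [List.nil_append]
      rw [aLoop_skip ']' r d (by decide) (by decide)]
      simp [bPieceToks, bPartL, bBare]
    | cons c rest => simp at h
  | succ n ih =>
    intro tok hlen hm r d
    cases tok with
    | nil =>
      simp only [List.nil_append]
      rw [aLoop_skip ']' r d (by decide) (by decide)]
      simp [bPieceToks, bPartL, bBare]
    | cons c tok' =>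
      simp only [List.mem_cons, not_or] at hm
      obtain ⟨hm1, hm2⟩ := hm
      by_cases hbr : c = '['
      · subst hbr
        simp only [List.cons_append]
        rw [aLoop_bracket_some _ tok' r d
          (by rw [show tok' ++ ']' :: r = tok' ++ ']' :: r from rfl]; exact aSplitClose_append tok' r hm2)]
        rw [elem_eq]
        cases hel : bFirstElem tok' with
        | nil => simp [bPieceToks, bPartL, hel, bBare]
        | cons e es => simp [bPieceToks, bPartL, hel, bBare]
      · by_cases ha : pyIsAlpha c
        · cases tok' with
          | nil =>
            simp only [List.cons_append, List.nil_append]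
            rw [aLoop_alpha_single c ']' r d hbr ha (by decide),
                aLoop_skip ']' r _ (by decide) (by decide)]
            simp [bPieceToks, bPartL, hbr, bBare, ha]
          | cons c2 tok2 =>
            simp only [List.mem_cons, not_or] at hm2
            obtain ⟨hm21, hm22⟩ := hm2
            simp only [List.cons_append]
            by_cases hl : pyIsLower c2
            · have h2ne : c2 ≠ '[' := (pyIsLower_ne c2 hl).1
              rw [aLoop_lower c c2 (tok2 ++ ']' :: r) d hbr ha hl,
                  ih tok2 (by simp at hlen ⊢; omega) hm22 r,
                  bPieceToks, bPieceToks, bPartL_cons c _ hbr, bPartL_cons c2 _ h2ne]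
              simp [bBare, ha, hl]
            · have hih := ih (c2 :: tok2) (by simp at hlen ⊢; omega)
                (by simp [List.mem_cons, not_or]; exact ⟨hm21, hm22⟩) r
              simp only [List.cons_append] at hih
              rw [aLoop_alpha_single c c2 (tok2 ++ ']' :: r) d hbr ha hl,
                  hih, bPieceToks, bPieceToks, bPartL_cons c _ hbr]
              by_cases h2b : c2 = '['
              · subst h2b
                simp [bPartL, bBare, ha]
              · rw [bPartL_cons c2 _ h2b]
                simp [bBare, ha, hl]
        · rw [List.cons_append, aLoop_skip c _ d hbr ha,
              ih tok' (by simp at hlen ⊢; omega) hm2 r,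
              bPieceToks, bPieceToks, bPartL_cons c _ hbr, bBare_cons_not_alpha c _ ha]

def toksOf : List (List Char) → List String
  | [] => []
  | [p] => bBare (bPartL p).1
  | p :: ps => bPieceToks p ++ toksOf ps

theorem toksOf_cons (p : List Char) (ps : List (List Char)) (h : ps ≠ []) :
    toksOf (p :: ps) = bPieceToks p ++ toksOf ps := by
  cases ps with
  | nil => exact absurd rfl h
  | cons q qs => rfl

theorem aLoop_toksOf_n : ∀ (n : Nat) (cs : List Char), cs.length ≤ n →
    ∀ (d : PySem.Dict String Int), aLoop cs d = List.foldl aStep d (toksOf (spl cs)) := by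
  intro n
  induction n with
  | zero =>
    intro cs h d
    cases cs with
    | nil => rw [spl_nil]; simp [aLoop_nil, toksOf, bPartL, bBare]
    | cons c rest => simp at h
  | succ n ih =>
    intro cs hlen d
    cases hsc : aSplitClose cs with
    | none =>
      rw [spl_eq_none _ hsc]
      exact aLoop_no_close cs.length cs le_rfl ((aSplitClose_none_iff cs).mp hsc) d
    | some p =>
      obtain ⟨t, r⟩ := p
      obtain ⟨hcs, hmem⟩ := aSplitClose_eq cs t r hsc
      rw [spl_eq_some _ _ _ hsc, toksOf_cons _ _ (spl_ne_nil r), hcs,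
          aLoop_segment t.length t le_rfl hmem r d,
          ih r (by rw [hcs] at hlen; simp at hlen ⊢; omega),
          List.foldl_append]

theorem aLoop_toksOf (cs : List Char) (d : PySem.Dict String Int) :
    aLoop cs d = List.foldl aStep d (toksOf (spl cs)) :=
  aLoop_toksOf_n cs.length cs le_rfl d

theorem toksOf_eq (ps : List (List Char)) (h : ps ≠ []) :
    toksOf ps = ps.dropLast.flatMap bPieceToks ++ bBare (bPartL (ps.getLastD [])).1 := by
  induction ps with
  | nil => exact absurd rfl h
  | cons p qs ih =>
    cases qs with
    | nil => simp [toksOf, List.getLastD]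
    | cons q rs =>
      rw [toksOf_cons p _ (by simp), ih (by simp),
          List.dropLast_cons_of_ne_nil (by simp : (q :: rs) ≠ [])]
      simp [List.getLastD, List.append_assoc]

theorem alt_eq (smiles : String) :
    elem_counts_from_smiles_alt smiles = (PySem.Dict.counter (toksOf (spl smiles.toList))).items := by
  rw [elem_counts_from_smiles_alt]
  simp only [splitOn_eq_spl, PySem.List.foldl_append_eq_flatMap, List.nil_append]
  rw [← toksOf_eq (spl smiles.toList) (spl_ne_nil _)]

-- ===== VERDICT (by name: the statement is the Claim_ definition above) =====
theorem elem_counts_from_smiles_spec : Claim_equal_elem_counts_from_smiles := by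
  intro smiles _
  unfold Spec_elem_counts_from_smiles
  rw [alt_eq]
  by_cases h : smiles = ""
  · subst h
    rw [elem_counts_from_smiles, if_pos rfl,
        show ("".toList) = ([] : List Char) from rfl, spl_nil]
    rfl
  · rw [elem_counts_from_smiles, if_neg h, aLoop_toksOf]
    rw [PySem.Dict.counter_eq_foldl]
    rfl
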